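-- pv_equiv track=rewrite | github.com/liugongfeng/CS61A | exam_prep01.py | longest_increasing_suffix
-- ===== SOURCE A (Python) =====
-- def longest_increasing_suffix(n):
--     """Return the longest increasing suffix of a positive
--      integer n.
--      >>> longest_increasing_suffix(63134)
--      134
--      >>> longest_increasing_suffix(233)
--      3
--      >>> longest_increasing_suffix(5689)
--      5689
--      >>> longest_increasing_suffix(568901)  # Note: 01 is the suffix, displayed as 1
--      1
--      """
--     m, suffix, k = 10, 0, 1
--     while n:
--         n, last = n//10, n%10
--         if last < m:
--             m, suffix, k = last, suffix+k*last, k*10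
--         else:
--             return suffix
--     return suffix
-- ===== SOURCE B (Python) =====
-- def longest_increasing_suffix(n):
--     q, last = divmod(n, 10)
--     if q == 0:
--         return last
--     if q % 10 < last:
--         return longest_increasing_suffix(q) * 10 + last
--     return last
-- ===== Notes on version B (the rewrite author's own statement) =====
-- stated objective: alternative
-- what changed: Replaces the bottom-up accumulator loop carrying state (m, suffix, k) with a top-down recursion that peeks at the next digit and, when it is smaller, builds the suffix value multiplicatively on the way back, with no auxiliary state.
import Mathlib
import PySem

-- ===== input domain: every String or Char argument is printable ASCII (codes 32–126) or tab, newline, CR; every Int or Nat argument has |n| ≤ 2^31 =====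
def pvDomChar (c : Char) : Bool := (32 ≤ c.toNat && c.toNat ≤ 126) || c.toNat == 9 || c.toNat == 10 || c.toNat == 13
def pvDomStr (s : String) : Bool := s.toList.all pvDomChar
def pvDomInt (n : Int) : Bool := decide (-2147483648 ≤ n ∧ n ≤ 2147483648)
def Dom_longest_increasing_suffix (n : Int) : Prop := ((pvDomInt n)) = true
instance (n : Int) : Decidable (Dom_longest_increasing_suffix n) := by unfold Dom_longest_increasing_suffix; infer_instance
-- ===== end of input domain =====

-- B replaces A's accumulator loop (state m, suffix, k) by a top-down recursion that peeks
-- at the next digit and builds the result on return; same cost, no auxiliary state.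

-- arithmetic fact used for termination of port B (and re-used by the proofs below):
-- if the Python recursion recurses from n to q = n // 10 (q ≠ 0 and q % 10 < n % 10), then |q| < |n|
theorem pvAbsDec (n : Int) (_h1 : PySem.Int.floordiv n 10 ≠ 0)
    (h2 : PySem.Int.mod (PySem.Int.floordiv n 10) 10 < PySem.Int.mod n 10) :
    (PySem.Int.floordiv n 10).natAbs < n.natAbs := by
  have e1 := PySem.Int.floordiv_mul_add_mod n 10
  have e2 := PySem.Int.floordiv_mul_add_mod (PySem.Int.floordiv n 10) 10
  have p1 : 0 ≤ PySem.Int.mod n 10 := PySem.Int.mod_nonneg _ (by norm_num)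
  have p2 : PySem.Int.mod n 10 < 10 := PySem.Int.mod_lt _ (by norm_num)
  have p3 : 0 ≤ PySem.Int.mod (PySem.Int.floordiv n 10) 10 := PySem.Int.mod_nonneg _ (by norm_num)
  have p4 : PySem.Int.mod (PySem.Int.floordiv n 10) 10 < 10 := PySem.Int.mod_lt _ (by norm_num)
  omega

-- ===== PORT A =====
-- the while-loop of A; it terminates because the bound m strictly decreases (0 ≤ n % 10 < m)
def lisA_loop (n m suffix k : Int) : Int :=
  if hn : n = 0 then suffix
  else
    let last := PySem.Int.mod n 10
    if hlt : last < m then lisA_loop (PySem.Int.floordiv n 10) last (suffix + k * last) (k * 10)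
    else suffix
termination_by m.toNat
decreasing_by
  have p1 : 0 ≤ PySem.Int.mod n 10 := PySem.Int.mod_nonneg _ (by norm_num)
  omega

def longest_increasing_suffix (n : Int) : Int := lisA_loop n 10 0 1

-- ===== PORT B =====
-- literal port of Source B (q, last = divmod(n, 10); peek at q % 10, recurse on q)
def longest_increasing_suffix_alt (n : Int) : Int :=
  let q := PySem.Int.floordiv n 10
  let last := PySem.Int.mod n 10
  if hq : q = 0 then last
  else if hlt : PySem.Int.mod q 10 < last then longest_increasing_suffix_alt q * 10 + last
  else last
termination_by n.natAbs
decreasing_by exact pvAbsDec n hq hlt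

-- ===== PRECONDITION & SPEC =====
def Spec_longest_increasing_suffix (n : Int) (out : Int) : Prop := out = longest_increasing_suffix_alt n
instance (n : Int) (out : Int) : Decidable (Spec_longest_increasing_suffix n out) := by unfold Spec_longest_increasing_suffix; infer_instance

-- ===== CLAIM (what is proved, stated in full; the proofs are below) =====
def Claim_equal_longest_increasing_suffix : Prop := ∀ (n : Int), Dom_longest_increasing_suffix n → Spec_longest_increasing_suffix n (longest_increasing_suffix n)

-- ===== LEMMAS AND PROOFS =====

-- spec helper: value of the longest strictly-increasing digit suffix of n, digits bounded by m
def lisAux (n m : Int) : Int :=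
  if hn : n = 0 then 0
  else
    if hlt : PySem.Int.mod n 10 < m then
      lisAux (PySem.Int.floordiv n 10) (PySem.Int.mod n 10) * 10 + PySem.Int.mod n 10
    else 0
termination_by m.toNat
decreasing_by
  have p1 : 0 ≤ PySem.Int.mod n 10 := PySem.Int.mod_nonneg _ (by norm_num)
  omega

-- A's loop state (m, suffix, k) unpacked against the pure suffix value lisAux
lemma lisA_loop_eq_aux (N : Nat) :
    ∀ (m n suffix k : Int), m.toNat ≤ N → lisA_loop n m suffix k = suffix + k * lisAux n m := by
  induction N with
  | zero =>
    intro m n suffix k hm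
    have p1 : 0 ≤ PySem.Int.mod n 10 := PySem.Int.mod_nonneg _ (by norm_num)
    have hlt : ¬ PySem.Int.mod n 10 < m := by omega
    rw [lisA_loop, lisAux]
    by_cases hn : n = 0
    · simp only [dif_pos hn]; ring
    · simp only [dif_neg hn, dif_neg hlt]; ring
  | succ N ih =>
    intro m n suffix k hm
    rw [lisA_loop, lisAux]
    by_cases hn : n = 0
    · simp only [dif_pos hn]; ring
    · simp only [dif_neg hn]
      by_cases hlt : PySem.Int.mod n 10 < m
      · simp only [dif_pos hlt]
        have p1 : 0 ≤ PySem.Int.mod n 10 := PySem.Int.mod_nonneg _ (by norm_num)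
        have hrec : (PySem.Int.mod n 10).toNat ≤ N := by omega
        rw [ih _ _ _ _ hrec]; ring
      · simp only [dif_neg hlt]; ring

-- once the loop has committed to a digit bound l with n % 10 < l, the pure suffix value
-- coincides with B's recursion
lemma lisAux_eq_alt (N : Nat) :
    ∀ (q l : Int), q.natAbs ≤ N → q ≠ 0 → PySem.Int.mod q 10 < l →
      lisAux q l = longest_increasing_suffix_alt q := by
  induction N with
  | zero => intro q l hq h0 _; omega
  | succ N ih =>
    intro q l hq h0 hlt
    rw [lisAux, longest_increasing_suffix_alt]
    simp only [dif_neg h0, dif_pos hlt]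
    by_cases hq0 : PySem.Int.floordiv q 10 = 0
    · rw [dif_pos hq0, hq0, lisAux]; simp
    · rw [dif_neg hq0]
      by_cases hlt2 : PySem.Int.mod (PySem.Int.floordiv q 10) 10 < PySem.Int.mod q 10
      · have hrec : (PySem.Int.floordiv q 10).natAbs ≤ N := by
          have := pvAbsDec q hq0 hlt2; omega
        rw [dif_pos hlt2, ih _ _ hrec hq0 hlt2]
      · rw [dif_neg hlt2, lisAux]
        simp only [dif_neg hq0, dif_neg hlt2]; ring

-- ===== VERDICT (by name: the statement is the Claim_ definition above) =====
theorem longest_increasing_suffix_spec : Claim_equal_longest_increasing_suffix := by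
  intro n _
  unfold Spec_longest_increasing_suffix longest_increasing_suffix
  rw [lisA_loop_eq_aux (10 : Int).toNat 10 n 0 1 le_rfl]
  by_cases hn : n = 0
  · subst hn
    rw [lisAux, longest_increasing_suffix_alt]
    simp [PySem.Int.floordiv, PySem.Int.mod]
  · have hlt : PySem.Int.mod n 10 < 10 := PySem.Int.mod_lt _ (by norm_num)
    rw [lisAux_eq_alt n.natAbs n 10 le_rfl hn hlt]; ring
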